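-- pv_equiv track=rewrite | github.com/pabloschwarzenberg/grader | tema8_ej4/tema8_ej4_a81e69e266a96097d4624a8bbc165f4c.py | whitda
-- ===== SOURCE A (Python) =====
-- def whitda(palabra):
--     Version1 = "abcdefghijklm"
--     Version2 = "zyxwvutsrqpon"
--     nerf = ""
--     for i in range(len(palabra)):
--         for a in range(len(Version1)):
--             if Version1[a] == palabra[i]:
--                 nerf += Version2[a]
--             elif Version2[a] == palabra[i]:
--                 nerf += Version1[a]
--     return nerf
-- ===== SOURCE B (Python) =====
-- def whitda(palabra):
--     return "".join(chr(219 - ord(c)) for c in palabra if 'a' <= c <= 'z')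
-- ===== Notes on version B (the rewrite author's own statement) =====
-- stated objective: faster
-- what changed: The two lookup strings encode the alphabet mirror c -> chr(219 - ord(c)) on lowercase letters, so B maps each lowercase letter by that closed-form arithmetic (dropping everything else) in one pass, with no inner scan over the tables.
import Mathlib
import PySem

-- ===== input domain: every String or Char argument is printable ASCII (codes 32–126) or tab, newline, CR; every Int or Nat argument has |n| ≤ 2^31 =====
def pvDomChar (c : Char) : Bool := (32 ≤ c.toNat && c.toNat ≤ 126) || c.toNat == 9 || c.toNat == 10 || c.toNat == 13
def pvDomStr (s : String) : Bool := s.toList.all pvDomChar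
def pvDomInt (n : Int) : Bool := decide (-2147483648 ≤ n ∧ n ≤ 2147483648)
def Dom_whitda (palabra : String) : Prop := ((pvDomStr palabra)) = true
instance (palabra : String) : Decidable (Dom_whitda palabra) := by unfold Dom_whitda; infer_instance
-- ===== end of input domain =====

-- B replaces A's inner scan of two 13-letter tables with the closed-form mirror chr(219 - ord(c)) on 'a'..'z'; simpler one pass.

-- ===== PORT A =====
def pvVersion1 : List Char := "abcdefghijklm".toList
def pvVersion2 : List Char := "zyxwvutsrqpon".toList

-- inner 'for a in range(len(Version1))' loop body for one character palabra[i]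
def pvInner (c : Char) (nerf : List Char) : List Char :=
  (pvVersion1.zip pvVersion2).foldl
    (fun nerf p =>
      if p.1 == c then nerf ++ [p.2]
      else if p.2 == c then nerf ++ [p.1]
      else nerf) nerf

def whitda (palabra : String) : String :=
  String.ofList (palabra.toList.foldl (fun nerf c => pvInner c nerf) [])

-- ===== PORT B =====
def whitda_alt (palabra : String) : String :=
  String.ofList ((palabra.toList.filter (fun c => 'a' ≤ c && c ≤ 'z')).map
    (fun c => Char.ofNat (219 - c.toNat)))

-- ===== PRECONDITION & SPEC =====
def Spec_whitda (palabra : String) (out : String) : Prop := out = whitda_alt palabra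
instance (palabra : String) (out : String) : Decidable (Spec_whitda palabra out) := by unfold Spec_whitda; infer_instance

-- ===== CLAIM (what is proved, stated in full; the proofs are below) =====
def Claim_equal_whitda : Prop := ∀ (palabra : String), Dom_whitda palabra → Spec_whitda palabra (whitda palabra)

-- ===== LEMMAS AND PROOFS =====

-- the inner loop only appends: factor out the accumulator
theorem pvInner_step_append (c : Char) (l : List (Char × Char)) (nerf : List Char) :
    l.foldl (fun nerf p =>
        if p.1 == c then nerf ++ [p.2]
        else if p.2 == c then nerf ++ [p.1]
        else nerf) nerf
      = nerf ++ l.foldl (fun nerf p =>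
        if p.1 == c then nerf ++ [p.2]
        else if p.2 == c then nerf ++ [p.1]
        else nerf) [] := by
  induction l generalizing nerf with
  | nil => simp
  | cons p l ih =>
    simp only [List.foldl_cons]
    rw [ih, ih (if p.1 == c then [] ++ [p.2] else if p.2 == c then [] ++ [p.1] else [])]
    split_ifs <;> simp

theorem pvInner_append (c : Char) (nerf : List Char) :
    pvInner c nerf = nerf ++ pvInner c [] := by
  simp only [pvInner]
  exact pvInner_step_append c _ nerf

-- what the inner loop produces on one candidate code point: the alphabet mirror, or nothing
theorem pvInner_code (n : Nat) (h : n < 128) :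
    pvInner (Char.ofNat n) [] =
      (if ('a' ≤ Char.ofNat n && Char.ofNat n ≤ 'z') = true
       then [Char.ofNat (219 - (Char.ofNat n).toNat)] else []) := by
  revert h; revert n; decide

theorem pvChar_ofNat_toNat (c : Char) (h : c.toNat < 128) : Char.ofNat c.toNat = c := by
  apply Char.ext
  simp only [Char.ofNat, Char.toNat]
  rw [dif_pos]
  · rfl
  · left; exact Nat.lt_trans h (by norm_num)

-- what the inner loop produces for one in-domain character
theorem pvInner_char (c : Char) (h : pvDomChar c = true) :
    pvInner c [] =
      (if ('a' ≤ c && c ≤ 'z') = true then [Char.ofNat (219 - c.toNat)] else []) := by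
  have hlt : c.toNat < 128 := by
    simp only [pvDomChar, Bool.or_eq_true, Bool.and_eq_true, decide_eq_true_eq, beq_iff_eq] at h
    omega
  have hc : Char.ofNat c.toNat = c := pvChar_ofNat_toNat c hlt
  conv_lhs => rw [← hc]
  rw [pvInner_code c.toNat hlt, hc]

-- the whole outer loop
theorem pvOuter (cs : List Char) (h : cs.all pvDomChar = true) (acc : List Char) :
    cs.foldl (fun nerf c => pvInner c nerf) acc
      = acc ++ (cs.filter (fun c => 'a' ≤ c && c ≤ 'z')).map
          (fun c => Char.ofNat (219 - c.toNat)) := by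
  induction cs generalizing acc with
  | nil => simp
  | cons c cs ih =>
    simp only [List.all_cons, Bool.and_eq_true] at h
    simp only [List.foldl_cons]
    rw [pvInner_append, ih h.2, List.filter_cons]
    rw [pvInner_char c h.1]
    split_ifs <;> simp

-- ===== VERDICT (by name: the statement is the Claim_ definition above) =====
theorem whitda_spec : Claim_equal_whitda := by
  intro palabra hdom
  show _ = _
  simp only [whitda, whitda_alt]
  rw [pvOuter palabra.toList hdom []]
  rfl
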